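-- pv_equiv track=rewrite | github.com/WahyuHidayattz/Monitoring-Server-Bot | bot.py | print_bar
-- ===== SOURCE A (Python) =====
-- def print_bar(label = "", percent = 0):
--     bar         = "█"
--     bar_empty   = "░"
--     text = label
--     for d in range(10):
--         if d <= int(percent/10):
--             text += bar
--         else:
--             text += bar_empty
--     text += f" ({percent}%)"
--     return text
-- ===== SOURCE B (Python) =====
-- def print_bar(label = "", percent = 0):
--     filled = max(0, min(int(percent / 10) + 1, 10))
--     return label + "\u2588" * filled + "\u2591" * (10 - filled) + f" ({percent}%)"
-- ===== Notes on version B (the rewrite author's own statement) =====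
-- stated objective: simpler
-- what changed: Replaces the 10-iteration per-cell loop with a closed-form clamped fill count max(0, min(int(percent/10)+1, 10)) and string repetition.
import Mathlib
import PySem

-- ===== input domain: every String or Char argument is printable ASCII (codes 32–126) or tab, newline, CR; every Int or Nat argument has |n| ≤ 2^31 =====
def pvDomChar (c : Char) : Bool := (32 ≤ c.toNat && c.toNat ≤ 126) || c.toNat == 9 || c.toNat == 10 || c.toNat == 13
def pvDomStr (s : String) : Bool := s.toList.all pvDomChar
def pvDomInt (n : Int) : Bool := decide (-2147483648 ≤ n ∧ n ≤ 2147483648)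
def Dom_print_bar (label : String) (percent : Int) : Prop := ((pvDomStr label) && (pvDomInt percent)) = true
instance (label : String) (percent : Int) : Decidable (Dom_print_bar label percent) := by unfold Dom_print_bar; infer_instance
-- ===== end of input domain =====

-- B replaces A's 10-step per-cell loop by a closed-form clamped fill count plus repetition (objective: simpler).

-- ===== PORT A =====
-- strings are handled as List Char (String.ofList at the end); int(percent/10) on |percent| ≤ 2^31 is
-- exact truncating division, i.e. Int.tdiv.
def print_bar (label : String) (percent : Int) : String :=
  let bar : List Char := ['█']
  let bar_empty : List Char := ['░']
  let text := label.toList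
  let text := (PySem.List.pyRange 0 10 1).foldl
    (fun t d => if d ≤ Int.tdiv percent 10 then t ++ bar else t ++ bar_empty) text
  String.ofList (text ++ ([' ', '('] ++ PySem.Int.toChars percent ++ ['%', ')']))

-- ===== PORT B =====
def print_bar_alt (label : String) (percent : Int) : String :=
  let filled : Int := max 0 (min (Int.tdiv percent 10 + 1) 10)
  String.ofList (label.toList ++ PySem.List.pyRepeat ['█'] filled
    ++ PySem.List.pyRepeat ['░'] (10 - filled)
    ++ ([' ', '('] ++ PySem.Int.toChars percent ++ ['%', ')']))

-- ===== PRECONDITION & SPEC =====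
def Spec_print_bar (label : String) (percent : Int) (out : String) : Prop := out = print_bar_alt label percent
instance (label : String) (percent : Int) (out : String) : Decidable (Spec_print_bar label percent out) := by unfold Spec_print_bar; infer_instance

-- ===== CLAIM (what is proved, stated in full; the proofs are below) =====
def Claim_equal_print_bar : Prop := ∀ (label : String) (percent : Int), Dom_print_bar label percent → Spec_print_bar label percent (print_bar label percent)

-- ===== LEMMAS AND PROOFS =====

-- the loop over range(10), starting from any accumulator, produces the clamped fill count
theorem bar_fold (acc : List Char) (t : Int) :
    ([0,1,2,3,4,5,6,7,8,9] : List Int).foldl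
      (fun a d => if d ≤ t then a ++ ['█'] else a ++ ['░']) acc
    = acc ++ List.replicate (max 0 (min (t+1) 10)).toNat '█'
        ++ List.replicate (10 - (max 0 (min (t+1) 10)).toNat) '░' := by
  by_cases h : t < 0
  · have e : (max 0 (min (t+1) 10)).toNat = 0 := by omega
    simp only [List.foldl, if_neg (by omega : ¬ (0:Int) ≤ t), if_neg (by omega : ¬ (1:Int) ≤ t),
      if_neg (by omega : ¬ (2:Int) ≤ t), if_neg (by omega : ¬ (3:Int) ≤ t),
      if_neg (by omega : ¬ (4:Int) ≤ t), if_neg (by omega : ¬ (5:Int) ≤ t),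
      if_neg (by omega : ¬ (6:Int) ≤ t), if_neg (by omega : ¬ (7:Int) ≤ t),
      if_neg (by omega : ¬ (8:Int) ≤ t), if_neg (by omega : ¬ (9:Int) ≤ t), e]
    simp
  · push_neg at h
    by_cases h9 : t ≤ 8
    · interval_cases t <;> simp [List.foldl]
    · push_neg at h9
      have e : (max 0 (min (t+1) 10)).toNat = 10 := by omega
      simp only [List.foldl, if_pos (by omega : (0:Int) ≤ t), if_pos (by omega : (1:Int) ≤ t),
        if_pos (by omega : (2:Int) ≤ t), if_pos (by omega : (3:Int) ≤ t),
        if_pos (by omega : (4:Int) ≤ t), if_pos (by omega : (5:Int) ≤ t),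
        if_pos (by omega : (6:Int) ≤ t), if_pos (by omega : (7:Int) ≤ t),
        if_pos (by omega : (8:Int) ≤ t), if_pos (by omega : (9:Int) ≤ t), e]
      simp

theorem range10 : PySem.List.pyRange 0 10 1 = ([0,1,2,3,4,5,6,7,8,9] : List Int) := by decide

-- ===== VERDICT (by name: the statement is the Claim_ definition above) =====
theorem print_bar_spec : Claim_equal_print_bar := by
  intro label percent _
  show print_bar label percent = print_bar_alt label percent
  unfold print_bar print_bar_alt
  simp only [range10, bar_fold]
  have hle : (0:Int) ≤ max 0 (min (Int.tdiv percent 10 + 1) 10) := le_max_left _ _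
  rw [PySem.List.pyRepeat_singleton, PySem.List.pyRepeat_singleton]
  have : (10 - max 0 (min (Int.tdiv percent 10 + 1) 10)).toNat
      = 10 - (max 0 (min (Int.tdiv percent 10 + 1) 10)).toNat := by omega
  rw [this]
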